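-- pv_equiv track=rewrite | github.com/yashitanamdeo/geeks-for-geeks | Medium/string_rp_or_pr/solution.py | solve
-- ===== SOURCE A (Python) =====
-- def solve(X, Y, S):
--
--     def rp(string, x, y, ans, flag):
--         stack = []
--         for char in string:
--             if char == 'p':
--                 if stack and stack[-1] == 'r':
--                     ans[0] += y
--                     stack.pop()
--                 else:
--                     stack.append(char)
--             else:
--                 stack.append(char)
--         if flag:
--             pr("".join(stack), x, y, ans, False)
--
--     def pr(string, x, y, ans, flag):
--         stack = []
--         for char in string:
--             if char == 'r':
--                 if stack and stack[-1] == 'p':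
--                     ans[0] += x
--                     stack.pop()
--                 else:
--                     stack.append(char)
--             else:
--                 stack.append(char)
--         if flag:
--             rp("".join(stack), x, y, ans, False)
--     ans = [0]
--     if X > Y:
--         pr(S, X, Y, ans, True)
--     else:
--         rp(S, X, Y, ans, True)
--     return ans[0]
-- ===== SOURCE B (Python) =====
-- def solve(X, Y, S):
--     # Counting pass: no stack, no string rebuilding. Within each maximal run of
--     # p/r characters (other characters are permanent separators), the greedy
--     # two-pass removal deletes `pairs` high-valued pairs first and then
--     # min(avail, fallen) low-valued pairs from the leftover.
--     hi, lo, first, second = (X, Y, 'p', 'r') if X > Y else (Y, X, 'r', 'p')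
--     avail = fallen = pairs = 0
--     total = 0
--     for ch in S:
--         if ch == first:
--             avail += 1
--         elif ch == second:
--             if avail:
--                 avail -= 1
--                 pairs += 1
--             else:
--                 fallen += 1
--         else:
--             total += hi * pairs + lo * min(avail, fallen)
--             avail = fallen = pairs = 0
--     return total + hi * pairs + lo * min(avail, fallen)
-- ===== Notes on version B (the rewrite author's own statement) =====
-- stated objective: simpler
-- what changed: Replaced A's two greedy stack passes (mutually recursive via a flag, scoring into a shared mutable ans cell, rebuilding the string between passes) by one stack-free counting pass: per run of p/r characters it counts available firsts, fallen seconds and matched pairs, scoring hi*pairs + lo*min(avail, fallen) at each separator, which equals the two-pass greedy result.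
import Mathlib
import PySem

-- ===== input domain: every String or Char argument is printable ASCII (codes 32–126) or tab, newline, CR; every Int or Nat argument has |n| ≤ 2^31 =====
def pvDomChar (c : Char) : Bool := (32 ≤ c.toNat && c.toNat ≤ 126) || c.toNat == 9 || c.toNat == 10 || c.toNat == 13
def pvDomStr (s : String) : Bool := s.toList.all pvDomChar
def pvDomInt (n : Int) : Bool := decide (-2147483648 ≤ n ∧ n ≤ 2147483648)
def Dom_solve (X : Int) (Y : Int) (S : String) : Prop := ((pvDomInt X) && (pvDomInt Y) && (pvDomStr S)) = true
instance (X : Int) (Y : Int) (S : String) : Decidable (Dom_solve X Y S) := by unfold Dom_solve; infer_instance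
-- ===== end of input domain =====

-- B replaces A's two stack passes (with mutual recursion via a flag and a shared
-- mutable ans cell) by a single stack-free counting pass over the string (objective: simpler).

-- ===== PORT A =====
-- the 'rp' inner loop: stack kept head-first (head = Python stack[-1]); ans delta returned
def rpLoopA (s : List Char) (y : Int) : List Char × Int :=
  s.foldl (fun acc c =>
    if c = 'p' then
      match acc.1 with
      | 'r' :: rest => (rest, acc.2 + y)
      | st => (c :: st, acc.2)
    else (c :: acc.1, acc.2)) ([], 0)

-- the 'pr' inner loop
def prLoopA (s : List Char) (x : Int) : List Char × Int :=
  s.foldl (fun acc c =>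
    if c = 'r' then
      match acc.1 with
      | 'p' :: rest => (rest, acc.2 + x)
      | st => (c :: st, acc.2)
    else (c :: acc.1, acc.2)) ([], 0)

-- rp with flag=False (the tail call); ans is threaded instead of mutated
def rpA_noflag (s : List Char) (y : Int) (ans : Int) : Int :=
  ans + (rpLoopA s y).2

def prA_noflag (s : List Char) (x : Int) (ans : Int) : Int :=
  ans + (prLoopA s x).2

-- rp with flag=True: run the loop, then call pr on the joined stack ("".join = reverse here)
def rpA (s : List Char) (x y ans : Int) : Int :=
  let r := rpLoopA s y
  prA_noflag r.1.reverse x (ans + r.2)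

def prA (s : List Char) (x y ans : Int) : Int :=
  let r := prLoopA s x
  rpA_noflag r.1.reverse y (ans + r.2)

def solve (X : Int) (Y : Int) (S : String) : Int :=
  if X > Y then prA S.toList X Y 0 else rpA S.toList X Y 0

-- ===== PORT B =====
-- one counting step; state = (avail, fallen, pairs, total); counters are counts, hence Nat
def bStep (first second : Char) (hi lo : Int)
    (st : Nat × Nat × Nat × Int) (ch : Char) : Nat × Nat × Nat × Int :=
  match st with
  | (avail, fallen, pairs, total) =>
    if ch = first then (avail + 1, fallen, pairs, total)
    else if ch = second then
      match avail with
      | 0 => (0, fallen + 1, pairs, total)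
      | n + 1 => (n, fallen, pairs + 1, total)
    else (0, 0, 0, total + hi * pairs + lo * (min avail fallen : Nat))

def solve_alt (X : Int) (Y : Int) (S : String) : Int :=
  let q := if X > Y then (X, Y, 'p', 'r') else (Y, X, 'r', 'p')
  let r := S.toList.foldl (bStep q.2.2.1 q.2.2.2 q.1 q.2.1) (0, 0, 0, 0)
  r.2.2.2 + q.1 * (r.2.2.1 : Nat) + q.2.1 * (min r.1 r.2.1 : Nat)

-- ===== PRECONDITION & SPEC =====
def Spec_solve (X : Int) (Y : Int) (S : String) (out : Int) : Prop := out = solve_alt X Y S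
instance (X : Int) (Y : Int) (S : String) (out : Int) : Decidable (Spec_solve X Y S out) := by unfold Spec_solve; infer_instance

-- ===== CLAIM (what is proved, stated in full; the proofs are below) =====
def Claim_equal_solve : Prop := ∀ (X : Int) (Y : Int) (S : String), Dom_solve X Y S → Spec_solve X Y S (solve X Y S)

-- ===== LEMMAS AND PROOFS =====

-- generic stack pass: pops (scoring v) when the char is `snd` and the stack top is `fst`
def passStep (fst snd : Char) (v : Int) (st : List Char × Int) (ch : Char) : List Char × Int :=
  if ch = snd then
    match st.1 with
    | c :: rest => if c = fst then (rest, st.2 + v) else (ch :: st.1, st.2)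
    | [] => (ch :: st.1, st.2)
  else (ch :: st.1, st.2)

def passFold (fst snd : Char) (v : Int) (l : List Char) (st : List Char × Int) : List Char × Int :=
  l.foldl (passStep fst snd v) st

-- abstract shape of pass-1's stack: f-run, s-run, then completed blocks (newest first)
def stackOf (f s : Char) (c a : Nat) (bs : List (Char × Nat × Nat)) : List Char :=
  List.replicate c f ++ List.replicate a s ++
    bs.flatMap (fun e => e.1 :: (List.replicate e.2.1 f ++ List.replicate e.2.2 s))

def minsum (bs : List (Char × Nat × Nat)) : Int :=
  (bs.map (fun e => ((min e.2.1 e.2.2 : Nat) : Int))).sum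

def WFbs (f s : Char) (bs : List (Char × Nat × Nat)) : Prop :=
  ∀ e ∈ bs, e.1 ≠ f ∧ e.1 ≠ s

theorem bridge_rp (s : List Char) (y : Int) :
    rpLoopA s y = passFold 'r' 'p' y s ([], 0) := by
  unfold rpLoopA passFold
  congr 1
  funext acc c
  unfold passStep
  by_cases hc : c = 'p'
  · subst hc
    cases h : acc.1 with
    | nil => simp
    | cons hd t =>
      by_cases hh : hd = 'r'
      · subst hh; simp
      · simp [hh]
  · simp [hc]

theorem bridge_pr (s : List Char) (x : Int) :
    prLoopA s x = passFold 'p' 'r' x s ([], 0) := by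
  unfold prLoopA passFold
  congr 1
  funext acc c
  unfold passStep
  by_cases hc : c = 'r'
  · subst hc
    cases h : acc.1 with
    | nil => simp
    | cons hd t =>
      by_cases hh : hd = 'p'
      · subst hh; simp
      · simp [hh]
  · simp [hc]

-- head of the (c = 0) stack shape is never f
theorem head_ne_f (f s : Char) (hfs : f ≠ s) (a : Nat) (bs : List (Char × Nat × Nat))
    (hwf : WFbs f s bs) : (stackOf f s 0 a bs).head? ≠ some f := by
  unfold stackOf
  cases a with
  | zero =>
    cases bs with
    | nil => simp
    | cons e t =>
      have := (hwf e (by simp)).1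
      simp [this]
  | succ n => simp [List.replicate_succ, hfs.symm]


theorem repl_shift (x : Char) (k : Nat) (st : List Char) :
    List.replicate k x ++ x :: st = x :: (List.replicate k x ++ st) := by
  rw [← List.singleton_append, ← List.append_assoc, ← List.replicate_succ', List.replicate_succ,
    List.cons_append]

-- pushing a run of chars ≠ snd
theorem pushRun (fst snd x : Char) (hx : x ≠ snd) (v : Int) :
    ∀ (n : Nat) (st : List Char) (m : Int),
      passFold fst snd v (List.replicate n x) (st, m) = (List.replicate n x ++ st, m) := by
  intro n
  induction n with
  | zero => intro st m; simp [passFold]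
  | succ k ih =>
    intro st m
    rw [List.replicate_succ]
    show passFold fst snd v (x :: List.replicate k x) (st, m) = _
    unfold passFold at *
    simp only [List.foldl_cons]
    rw [show passStep fst snd v (st, m) x = (x :: st, m) by simp [passStep, hx]]
    rw [ih (x :: st) m, repl_shift]
    simp

-- pushing a run of snd when the top is never fst
theorem pushSnd (fst snd : Char) (hfs : snd ≠ fst) (v : Int) :
    ∀ (n : Nat) (st : List Char) (m : Int), st.head? ≠ some fst →
      passFold fst snd v (List.replicate n snd) (st, m) = (List.replicate n snd ++ st, m) := by
  intro n
  induction n with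
  | zero => intro st m _; simp [passFold]
  | succ k ih =>
    intro st m hh
    rw [List.replicate_succ]
    unfold passFold at *
    simp only [List.foldl_cons]
    have hstep : passStep fst snd v (st, m) snd = (snd :: st, m) := by
      unfold passStep
      cases st with
      | nil => simp
      | cons hd t =>
        have : hd ≠ fst := by simpa using hh
        simp [this]
    rw [hstep, ih (snd :: st) m (by simp [hfs]), repl_shift]
    simp

-- a run of c snd's over a stack fst^a ++ st (top-safe st): pops min c a times
theorem popRun (fst snd : Char) (hfs : fst ≠ snd) (v : Int) :
    ∀ (c a : Nat) (st : List Char) (m : Int), st.head? ≠ some fst →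
      passFold fst snd v (List.replicate c snd) (List.replicate a fst ++ st, m)
        = (List.replicate (c - a) snd ++ List.replicate (a - c) fst ++ st,
           m + v * (min c a : Nat)) := by
  intro c
  induction c with
  | zero => intro a st m _; simp [passFold]
  | succ k ih =>
    intro a st m hh
    rw [List.replicate_succ]
    unfold passFold at *
    simp only [List.foldl_cons]
    cases a with
    | zero =>
      have hstep : passStep fst snd v (st, m) snd = (snd :: st, m) := by
        unfold passStep
        cases st with
        | nil => simp
        | cons hd t =>
          have : hd ≠ fst := by simpa using hh
          simp [this]
      simp only [List.replicate_zero, List.nil_append] at *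
      have hps := pushSnd fst snd (Ne.symm hfs) v k (snd :: st) m (by simp [Ne.symm hfs])
      unfold passFold at hps
      rw [hstep, hps, repl_shift]
      simp [List.replicate_succ]
    | succ a' =>
      have hstep : passStep fst snd v (List.replicate (a' + 1) fst ++ st, m) snd
          = (List.replicate a' fst ++ st, m + v) := by
        unfold passStep
        simp [List.replicate_succ]
      rw [hstep, ih a' st (m + v) hh]
      have h1 : k + 1 - (a' + 1) = k - a' := by omega
      have h2 : a' + 1 - (k + 1) = a' - k := by omega
      have h3 : (min (k + 1) (a' + 1) : Nat) = min k a' + 1 := by omega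
      rw [h1, h2, h3]
      push_cast
      ring_nf

-- pass 2 over the reversed completed blocks: scores lo per matched pair, safe top
theorem pass2_blocks (f s : Char) (hfs : f ≠ s) (lo : Int) :
    ∀ (bs : List (Char × Nat × Nat)), WFbs f s bs →
      ∃ st', passFold s f lo
          ((bs.flatMap (fun e => e.1 :: (List.replicate e.2.1 f ++ List.replicate e.2.2 s))).reverse)
          ([], 0) = (st', lo * minsum bs) ∧ st'.head? ≠ some s := by
  intro bs
  induction bs with
  | nil => intro _; exact ⟨[], by simp [passFold, minsum], by simp⟩
  | cons e t ih =>
    intro hwf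
    obtain ⟨st', hfold, hhd⟩ := ih (fun x hx => hwf x (by simp [hx]))
    refine ⟨e.1 :: (List.replicate (e.2.1 - e.2.2) f ++ List.replicate (e.2.2 - e.2.1) s ++ st'), ?_, ?_⟩
    · have hsplit : ((e :: t).flatMap (fun e => e.1 :: (List.replicate e.2.1 f ++ List.replicate e.2.2 s))).reverse
          = (t.flatMap (fun e => e.1 :: (List.replicate e.2.1 f ++ List.replicate e.2.2 s))).reverse
            ++ (List.replicate e.2.2 s ++ (List.replicate e.2.1 f ++ [e.1])) := by
        simp [List.reverse_append]
      rw [hsplit]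
      unfold passFold at *
      rw [List.foldl_append, hfold, List.foldl_append, List.foldl_append]
      rw [show (List.foldl (passStep s f lo) (st', lo * minsum t) (List.replicate e.2.2 s) : List Char × Int)
            = (List.replicate e.2.2 s ++ st', lo * minsum t) from
          pushRun s f s (Ne.symm hfs) lo e.2.2 st' _]
      rw [show (List.foldl (passStep s f lo) (List.replicate e.2.2 s ++ st', lo * minsum t) (List.replicate e.2.1 f) : List Char × Int)
            = _ from popRun s f hfs.symm lo e.2.1 e.2.2 st' _ hhd]
      have hstep : passStep s f lo
          (List.replicate (e.2.1 - e.2.2) f ++ List.replicate (e.2.2 - e.2.1) s ++ st',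
            lo * minsum t + lo * ((min e.2.1 e.2.2 : Nat) : Int)) e.1
          = (e.1 :: (List.replicate (e.2.1 - e.2.2) f ++ List.replicate (e.2.2 - e.2.1) s ++ st'),
             lo * minsum t + lo * ((min e.2.1 e.2.2 : Nat) : Int)) := by
        have hef : e.1 ≠ f := (hwf e (by simp)).1
        simp [passStep, hef]
      simp only [List.foldl_cons, List.foldl_nil, hstep]
      have : minsum (e :: t) = ((min e.2.1 e.2.2 : Nat) : Int) + minsum t := by
        simp [minsum]
      rw [this]; ring_nf
    · have hes : e.1 ≠ s := (hwf e (by simp)).2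
      simp [hes]

-- pass 2 over the whole reversed final stack
theorem pass2_total (f s : Char) (hfs : f ≠ s) (lo : Int)
    (c a : Nat) (bs : List (Char × Nat × Nat)) (hwf : WFbs f s bs) :
    (passFold s f lo ((stackOf f s c a bs).reverse) ([], 0)).2
      = lo * (minsum bs + ((min c a : Nat) : Int)) := by
  obtain ⟨st', hfold, hhd⟩ := pass2_blocks f s hfs lo bs hwf
  unfold stackOf
  rw [show (List.replicate c f ++ List.replicate a s ++
      bs.flatMap (fun e => e.1 :: (List.replicate e.2.1 f ++ List.replicate e.2.2 s))).reverse
      = (bs.flatMap (fun e => e.1 :: (List.replicate e.2.1 f ++ List.replicate e.2.2 s))).reverse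
        ++ (List.replicate a s ++ List.replicate c f) by simp [List.reverse_append]]
  unfold passFold at *
  rw [List.foldl_append, hfold, List.foldl_append]
  rw [show (List.foldl (passStep s f lo) (st', lo * minsum bs) (List.replicate a s) : List Char × Int)
        = (List.replicate a s ++ st', lo * minsum bs) from pushRun s f s (Ne.symm hfs) lo a st' _]
  rw [show (List.foldl (passStep s f lo) (List.replicate a s ++ st', lo * minsum bs) (List.replicate c f) : List Char × Int)
        = _ from popRun s f hfs.symm lo c a st' _ hhd]
  show lo * minsum bs + lo * ((min c a : Nat) : Int) = _
  ring

-- the joint invariant between pass 1 and B's counting fold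
theorem joint (f s : Char) (hfs : f ≠ s) (hi lo : Int) :
    ∀ (l : List Char) (c a k : Nat) (bs : List (Char × Nat × Nat)) (m acc : Int),
      WFbs f s bs →
      ∃ (c' a' k' : Nat) (bs' : List (Char × Nat × Nat)) (m' : Int),
        passFold f s hi l (stackOf f s c a bs, m) = (stackOf f s c' a' bs', m') ∧
        l.foldl (bStep f s hi lo) (c, a, k, acc)
          = (c', a', k', acc + (m' - m) - hi * ((k' : Int) - (k : Int)) + lo * (minsum bs' - minsum bs)) ∧
        WFbs f s bs' := by
  intro l
  induction l with
  | nil =>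
    intro c a k bs m acc hwf
    exact ⟨c, a, k, bs, m, by simp [passFold], by simp, hwf⟩
  | cons ch t ih =>
    intro c a k bs m acc hwf
    by_cases hchf : ch = f
    · -- push an f
      have hstep : passStep f s hi (stackOf f s c a bs, m) ch = (stackOf f s (c + 1) a bs, m) := by
        rw [hchf]
        unfold passStep stackOf
        simp [hfs, List.replicate_succ]
      have hbstep : bStep f s hi lo (c, a, k, acc) ch = (c + 1, a, k, acc) := by
        simp [bStep, hchf]
      obtain ⟨c', a', k', bs', m', h1, h2, h3⟩ := ih (c + 1) a k bs m acc hwf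
      refine ⟨c', a', k', bs', m', ?_, ?_, h3⟩
      · unfold passFold at h1 ⊢
        rw [List.foldl_cons, hstep]; exact h1
      · rw [List.foldl_cons, hbstep]; exact h2
    · by_cases hchs : ch = s
      · cases c with
        | zero =>
          -- push an s
          have hstep : passStep f s hi (stackOf f s 0 a bs, m) ch = (stackOf f s 0 (a + 1) bs, m) := by
            rw [hchs]
            have hh := head_ne_f f s hfs a bs hwf
            have hcons : stackOf f s 0 (a + 1) bs = s :: stackOf f s 0 a bs := by
              unfold stackOf; simp [List.replicate_succ]
            unfold passStep
            rw [hcons]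
            cases hst : (stackOf f s 0 a bs) with
            | nil => simp
            | cons hd tl =>
              have hne : hd ≠ f := by rw [hst] at hh; simpa using hh
              simp [hne]
          have hbstep : bStep f s hi lo (0, a, k, acc) ch = (0, a + 1, k, acc) := by
            simp [bStep, hchs, Ne.symm hfs]
          obtain ⟨c', a', k', bs', m', h1, h2, h3⟩ := ih 0 (a + 1) k bs m acc hwf
          refine ⟨c', a', k', bs', m', ?_, ?_, h3⟩
          · unfold passFold at h1 ⊢
            rw [List.foldl_cons, hstep]; exact h1
          · rw [List.foldl_cons, hbstep]; exact h2
        | succ c0 =>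
          -- pop an f, score hi
          have hstep : passStep f s hi (stackOf f s (c0 + 1) a bs, m) ch = (stackOf f s c0 a bs, m + hi) := by
            rw [hchs]
            unfold passStep stackOf
            simp [List.replicate_succ]
          have hbstep : bStep f s hi lo (c0 + 1, a, k, acc) ch = (c0, a, k + 1, acc) := by
            simp [bStep, hchs, Ne.symm hfs]
          obtain ⟨c', a', k', bs', m', h1, h2, h3⟩ := ih c0 a (k + 1) bs (m + hi) acc hwf
          refine ⟨c', a', k', bs', m', ?_, ?_, h3⟩
          · unfold passFold at h1 ⊢
            rw [List.foldl_cons, hstep]; exact h1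
          · rw [List.foldl_cons, hbstep, h2]
            simp only [Prod.mk.injEq, true_and]
            push_cast
            ring
      · -- boundary char: push it, close the block
        have hstep : passStep f s hi (stackOf f s c a bs, m) ch = (stackOf f s 0 0 ((ch, c, a) :: bs), m) := by
          unfold passStep stackOf
          simp [hchs]
        have hbstep : bStep f s hi lo (c, a, k, acc) ch
            = (0, 0, 0, acc + hi * (k : Int) + lo * ((min c a : Nat) : Int)) := by
          simp [bStep, hchf, hchs]
        have hwf2 : WFbs f s ((ch, c, a) :: bs) := by
          intro e he
          rcases List.mem_cons.mp he with h | h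
          · subst h; exact ⟨hchf, hchs⟩
          · exact hwf e h
        obtain ⟨c', a', k', bs', m', h1, h2, h3⟩ :=
          ih 0 0 0 ((ch, c, a) :: bs) m (acc + hi * (k : Int) + lo * ((min c a : Nat) : Int)) hwf2
        refine ⟨c', a', k', bs', m', ?_, ?_, h3⟩
        · unfold passFold at h1 ⊢
          rw [List.foldl_cons, hstep]; exact h1
        · rw [List.foldl_cons, hbstep, h2]
          have hms : minsum ((ch, c, a) :: bs) = ((min c a : Nat) : Int) + minsum bs := by
            simp [minsum]
          simp only [Prod.mk.injEq, true_and]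
          rw [hms]
          push_cast
          ring

-- both passes of A equal B's single counting pass, generically
theorem main_generic (f s : Char) (hfs : f ≠ s) (hi lo : Int) (l : List Char) :
    (passFold f s hi l ([], 0)).2
      + (passFold s f lo ((passFold f s hi l ([], 0)).1.reverse) ([], 0)).2
    = (l.foldl (bStep f s hi lo) (0, 0, 0, 0)).2.2.2
      + hi * (((l.foldl (bStep f s hi lo) (0, 0, 0, 0)).2.2.1 : Nat) : Int)
      + lo * ((min (l.foldl (bStep f s hi lo) (0, 0, 0, 0)).1
                   (l.foldl (bStep f s hi lo) (0, 0, 0, 0)).2.1 : Nat) : Int) := by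
  obtain ⟨c', a', k', bs', m', h1, h2, h3⟩ :=
    joint f s hfs hi lo l 0 0 0 [] 0 0 (by intro e he; simp at he)
  have hz : stackOf f s 0 0 [] = [] := by simp [stackOf]
  rw [hz] at h1
  rw [show minsum [] = 0 from by simp [minsum]] at h2
  rw [h1, h2]
  rw [pass2_total f s hfs lo c' a' bs' h3]
  ring

-- ===== VERDICT (by name: the statement is the Claim_ definition above) =====
theorem solve_spec : Claim_equal_solve := by
  intro X Y S _
  unfold Spec_solve solve solve_alt prA rpA prA_noflag rpA_noflag
  by_cases h : X > Y
  · simp only [h, if_true]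
    rw [bridge_pr, bridge_rp]
    have := main_generic 'p' 'r' (by decide) X Y S.toList
    simp only [zero_add] at *
    linarith [this]
  · simp only [h, if_false]
    rw [bridge_rp, bridge_pr]
    have := main_generic 'r' 'p' (by decide) Y X S.toList
    simp only [zero_add] at *
    linarith [this]
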